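-- pv_equiv track=rewrite | github.com/innovatehubph/boyong_v1 | python/api/synthesize.py | _build_tts_provider_chain
-- ===== SOURCE A (Python) =====
-- def _build_tts_provider_chain(settings_dict: dict, priority: str, is_filipino: bool) -> list[str]:
--     """Build TTS provider chain based on settings and priority"""
--     providers = []
--
--     if priority == "auto":
--         # ElevenLabs first, then Kokoro fallback (new default behavior)
--         if settings_dict.get("tts_elevenlabs_enable", True):
--             providers.append("elevenlabs")
--
--         # Kokoro as primary fallback
--         if settings_dict.get("tts_kokoro_enable", True):
--             providers.append("kokoro")
--
--         # ToucanTTS for Filipino if enabled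
--         if is_filipino and settings_dict.get("tts_toucan_enable", True):
--             providers.append("toucan")
--
--     elif priority == "elevenlabs" or priority == "elevenlabs_first":
--         # ElevenLabs as primary with Kokoro fallback
--         if settings_dict.get("tts_elevenlabs_enable", True):
--             providers.append("elevenlabs")
--         # Kokoro as primary fallback
--         if settings_dict.get("tts_kokoro_enable", True):
--             providers.append("kokoro")
--         # ToucanTTS as secondary fallback
--         if settings_dict.get("tts_toucan_enable", True):
--             providers.append("toucan")
--
--     elif priority == "toucan":
--         if settings_dict.get("tts_toucan_enable", True):
--             providers.append("toucan")
--         # Add fallbacks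
--         if settings_dict.get("tts_elevenlabs_enable", True):
--             providers.append("elevenlabs")
--         if settings_dict.get("tts_kokoro_enable", True):
--             providers.append("kokoro")
--
--     elif priority == "kokoro":
--         if settings_dict.get("tts_kokoro_enable", True):
--             providers.append("kokoro")
--         # Add fallbacks
--         if settings_dict.get("tts_elevenlabs_enable", True):
--             providers.append("elevenlabs")
--         if settings_dict.get("tts_toucan_enable", True):
--             providers.append("toucan")
--
--     # Remove duplicates while preserving order
--     seen = set()
--     unique_providers = []
--     for provider in providers:
--         if provider not in seen:
--             seen.add(provider)
--             unique_providers.append(provider)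
--
--     return unique_providers
-- ===== SOURCE B (Python) =====
-- def _build_tts_provider_chain(settings_dict: dict, priority: str, is_filipino: bool) -> list[str]:
--     """Move-to-front over one canonical order instead of enumerating branches:
--     every chain is the base order with the requested provider rotated to the
--     front ('auto' is the base order with toucan gated by is_filipino)."""
--     base = ["elevenlabs", "kokoro", "toucan"]
--     if priority == "auto":
--         chain = base if is_filipino else base[:2]
--     elif priority == "elevenlabs_first":
--         chain = base
--     elif priority in base:
--         chain = [priority] + [p for p in base if p != priority]
--     else:
--         chain = []
--     return [p for p in chain if settings_dict.get("tts_" + p + "_enable", True)]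
-- ===== Notes on version B (the rewrite author's own statement) =====
-- stated objective: simpler
-- what changed: Instead of A's five explicit append branches plus a dedup loop, B derives every chain from one canonical base order by a move-to-front rotation of the requested provider ('auto' just gates toucan by is_filipino), then applies one enable-flag filter; no dedup pass is needed.
import Mathlib
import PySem

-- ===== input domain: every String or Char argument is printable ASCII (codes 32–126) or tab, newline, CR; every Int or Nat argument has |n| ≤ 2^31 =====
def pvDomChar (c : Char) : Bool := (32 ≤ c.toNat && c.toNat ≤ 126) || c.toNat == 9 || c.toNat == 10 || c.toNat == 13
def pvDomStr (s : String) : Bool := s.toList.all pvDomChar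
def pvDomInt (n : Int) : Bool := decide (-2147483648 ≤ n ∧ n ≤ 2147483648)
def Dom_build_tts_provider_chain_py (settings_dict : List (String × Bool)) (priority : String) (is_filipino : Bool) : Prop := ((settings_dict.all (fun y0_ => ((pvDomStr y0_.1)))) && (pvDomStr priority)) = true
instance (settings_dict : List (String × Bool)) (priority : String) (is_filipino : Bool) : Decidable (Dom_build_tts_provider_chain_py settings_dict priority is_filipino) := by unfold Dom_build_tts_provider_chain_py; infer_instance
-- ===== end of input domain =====

-- B derives every chain from one canonical base order by move-to-front rotation plus one enable filter, replacing A's five append branches and dedup loop (simpler; same behaviour).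


-- ===== PORT A =====
-- settings_dict.get(key, True): first-match lookup in the association list (Python dict .get with default)
def pvSettingsGetD (d : List (String × Bool)) (k : String) (dflt : Bool) : Bool :=
  match d with
  | [] => dflt
  | (k', v) :: rest => if k' == k then v else pvSettingsGetD rest k dflt

-- the dedup loop: for provider in providers: if provider not in seen: … append
def pvDedupLoop (providers : List String) : List String :=
  (providers.foldl
    (fun (st : PySem.Set String × List String) provider =>
      if st.1.contains provider then st else (st.1.add provider, st.2 ++ [provider]))
    ((PySem.Set.ofList []), [])).2

def build_tts_provider_chain_py (settings_dict : List (String × Bool)) (priority : String) (is_filipino : Bool) : List String :=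
  let providers : List String :=
    if priority == "auto" then
      (if pvSettingsGetD settings_dict "tts_elevenlabs_enable" true then ["elevenlabs"] else []) ++
      (if pvSettingsGetD settings_dict "tts_kokoro_enable" true then ["kokoro"] else []) ++
      (if is_filipino && pvSettingsGetD settings_dict "tts_toucan_enable" true then ["toucan"] else [])
    else if priority == "elevenlabs" || priority == "elevenlabs_first" then
      (if pvSettingsGetD settings_dict "tts_elevenlabs_enable" true then ["elevenlabs"] else []) ++
      (if pvSettingsGetD settings_dict "tts_kokoro_enable" true then ["kokoro"] else []) ++
      (if pvSettingsGetD settings_dict "tts_toucan_enable" true then ["toucan"] else [])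
    else if priority == "toucan" then
      (if pvSettingsGetD settings_dict "tts_toucan_enable" true then ["toucan"] else []) ++
      (if pvSettingsGetD settings_dict "tts_elevenlabs_enable" true then ["elevenlabs"] else []) ++
      (if pvSettingsGetD settings_dict "tts_kokoro_enable" true then ["kokoro"] else [])
    else if priority == "kokoro" then
      (if pvSettingsGetD settings_dict "tts_kokoro_enable" true then ["kokoro"] else []) ++
      (if pvSettingsGetD settings_dict "tts_elevenlabs_enable" true then ["elevenlabs"] else []) ++
      (if pvSettingsGetD settings_dict "tts_toucan_enable" true then ["toucan"] else [])
    else []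
  pvDedupLoop providers

-- ===== PORT B =====
-- base[:2] on a 3-element literal list is List.take 2 (exact: nonnegative in-range slice)
def build_tts_provider_chain_py_alt (settings_dict : List (String × Bool)) (priority : String) (is_filipino : Bool) : List String :=
  let base : List String := ["elevenlabs", "kokoro", "toucan"]
  let chain : List String :=
    if priority == "auto" then (if is_filipino then base else base.take 2)
    else if priority == "elevenlabs_first" then base
    else if base.contains priority then priority :: base.filter (fun p => p != priority)
    else []
  chain.filter (fun p => pvSettingsGetD settings_dict ("tts_" ++ p ++ "_enable") true)

-- ===== PRECONDITION & SPEC =====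
def Spec_build_tts_provider_chain_py (settings_dict : List (String × Bool)) (priority : String) (is_filipino : Bool) (out : List String) : Prop := out = build_tts_provider_chain_py_alt settings_dict priority is_filipino
instance (settings_dict : List (String × Bool)) (priority : String) (is_filipino : Bool) (out : List String) : Decidable (Spec_build_tts_provider_chain_py settings_dict priority is_filipino out) := by unfold Spec_build_tts_provider_chain_py; infer_instance

-- ===== CLAIM =====
def Claim_equal_build_tts_provider_chain_py : Prop := ∀ (settings_dict : List (String × Bool)) (priority : String) (is_filipino : Bool), Dom_build_tts_provider_chain_py settings_dict priority is_filipino → Spec_build_tts_provider_chain_py settings_dict priority is_filipino (build_tts_provider_chain_py settings_dict priority is_filipino)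

-- ===== LEMMAS AND PROOFS =====

-- ===== VERDICT =====
theorem build_tts_provider_chain_py_spec : Claim_equal_build_tts_provider_chain_py := by
  intro s priority fil _
  unfold Spec_build_tts_provider_chain_py build_tts_provider_chain_py build_tts_provider_chain_py_alt
  by_cases h1 : priority = "auto"
  · subst h1
    cases fil <;>
    cases he : pvSettingsGetD s "tts_elevenlabs_enable" true <;>
    cases hk : pvSettingsGetD s "tts_kokoro_enable" true <;>
    cases ht : pvSettingsGetD s "tts_toucan_enable" true <;>
    simp [pvDedupLoop, PySem.Set.contains, PySem.Set.add, he, hk, ht]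
  by_cases h2 : priority = "elevenlabs"
  · subst h2
    cases he : pvSettingsGetD s "tts_elevenlabs_enable" true <;>
    cases hk : pvSettingsGetD s "tts_kokoro_enable" true <;>
    cases ht : pvSettingsGetD s "tts_toucan_enable" true <;>
    simp [pvDedupLoop, PySem.Set.contains, PySem.Set.add, he, hk, ht]
  by_cases h3 : priority = "elevenlabs_first"
  · subst h3
    cases he : pvSettingsGetD s "tts_elevenlabs_enable" true <;>
    cases hk : pvSettingsGetD s "tts_kokoro_enable" true <;>
    cases ht : pvSettingsGetD s "tts_toucan_enable" true <;>
    simp [pvDedupLoop, PySem.Set.contains, PySem.Set.add, he, hk, ht]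
  by_cases h4 : priority = "toucan"
  · subst h4
    cases he : pvSettingsGetD s "tts_elevenlabs_enable" true <;>
    cases hk : pvSettingsGetD s "tts_kokoro_enable" true <;>
    cases ht : pvSettingsGetD s "tts_toucan_enable" true <;>
    simp [pvDedupLoop, PySem.Set.contains, PySem.Set.add, he, hk, ht]
  by_cases h5 : priority = "kokoro"
  · subst h5
    cases he : pvSettingsGetD s "tts_elevenlabs_enable" true <;>
    cases hk : pvSettingsGetD s "tts_kokoro_enable" true <;>
    cases ht : pvSettingsGetD s "tts_toucan_enable" true <;>
    simp [pvDedupLoop, PySem.Set.contains, PySem.Set.add, he, hk, ht]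
  simp [pvDedupLoop, h1, h2, h3, h4, h5]
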